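-- pv_equiv track=rewrite | github.com/naina-dhingra-07/os-lab3 | algo.py | second_chance
-- ===== SOURCE A (Python) =====
-- def second_chance(pages, frames):
--     memory = []
--     ref_bit = []
--     pointer = 0
--     faults = 0
--
--     for page in pages:
--         if page in memory:
--             ref_bit[memory.index(page)] = 1
--         else:
--             faults += 1
--             if len(memory) < frames:
--                 memory.append(page)
--                 ref_bit.append(1)
--             else:
--                 while True:
--                     if ref_bit[pointer] == 0:
--                         memory[pointer] = page
--                         ref_bit[pointer] = 1
--                         pointer = (pointer + 1) % frames
--                         break
--                     else:
--                         ref_bit[pointer] = 0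
--                         pointer = (pointer + 1) % frames
--
--     return faults
-- ===== SOURCE B (Python) =====
-- def second_chance(pages, frames):
--     # FIFO-queue (clock) formulation: front of the queue is the next eviction candidate.
--     queue = []  # entries [page, ref_bit]; front-to-back order = clock order from the pointer
--     faults = 0
--     for page in pages:
--         hit = False
--         for entry in queue:
--             if entry[0] == page:
--                 entry[1] = 1
--                 hit = True
--                 break
--         if hit:
--             continue
--         faults += 1
--         if len(queue) < frames:
--             queue.append([page, 1])
--         else:
--             while True:
--                 victim, bit = queue.pop(0)
--                 if bit == 0:
--                     queue.append([page, 1])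
--                     break
--                 queue.append([victim, 0])
--     return faults
-- ===== Notes on version B (the rewrite author's own statement) =====
-- stated objective: idiomatic
-- what changed: B replaces A's fixed memory/ref-bit arrays with a modular clock pointer by a single FIFO queue of (page, ref_bit) entries whose front is always the next eviction candidate (second chance = pop front, re-push with cleared bit).
import Mathlib
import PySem

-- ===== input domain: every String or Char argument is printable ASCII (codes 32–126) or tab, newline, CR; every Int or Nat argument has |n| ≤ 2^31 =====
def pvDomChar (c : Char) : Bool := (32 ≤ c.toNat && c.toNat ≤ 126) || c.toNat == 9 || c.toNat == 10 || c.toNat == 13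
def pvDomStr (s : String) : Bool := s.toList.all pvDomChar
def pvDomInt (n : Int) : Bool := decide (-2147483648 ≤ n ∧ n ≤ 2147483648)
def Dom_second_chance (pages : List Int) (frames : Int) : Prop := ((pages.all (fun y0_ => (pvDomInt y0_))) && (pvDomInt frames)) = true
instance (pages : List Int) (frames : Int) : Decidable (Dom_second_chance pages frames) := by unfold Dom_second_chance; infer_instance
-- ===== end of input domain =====

-- B replaces A's fixed arrays + modular clock pointer by a FIFO queue of (page, ref-bit)
-- entries (front = next eviction candidate); same page-fault count, proved equal on Pre_.

-- ===== PORT A =====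
-- the `while True` clock sweep of A; fuel = len(ref_bit) + 1 always suffices (each
-- iteration before the break clears one of the ≤ len set bits)
def scSweep (page : Int) (frames : Int) : Nat → List Int → List Int → Nat → (List Int × List Int × Nat)
  | 0, m, r, p => (m, r, p)
  | fuel + 1, m, r, p =>
    if r.getD p 1 = 0 then
      (m.set p page, r.set p 1, (p + 1) % frames.toNat)
    else
      scSweep page frames fuel m (r.set p 0) ((p + 1) % frames.toNat)

def scStepA (frames : Int) (st : List Int × List Int × Nat × Int) (page : Int) :
    List Int × List Int × Nat × Int :=
  let (m, r, p, f) := st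
  if page ∈ m then
    match PySem.List.index? m page with
    | some i => (m, r.set i 1, p, f)
    | none => (m, r, p, f)   -- unreachable: page ∈ m
  else if (m.length : Int) < frames then
    (m ++ [page], r ++ [1], p, f + 1)
  else
    let (m', r', p') := scSweep page frames (r.length + 1) m r p
    (m', r', p', f + 1)

def second_chance (pages : List Int) (frames : Int) : Int :=
  (pages.foldl (scStepA frames) ([], [], 0, 0)).2.2.2

-- ===== PORT B =====
-- the hit scan: set the ref bit of the first entry holding `page`; none = miss
def scMark (page : Int) : List (Int × Int) → Option (List (Int × Int))
  | [] => none
  | e :: rest =>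
    if e.1 = page then some ((e.1, 1) :: rest)
    else (scMark page rest).map (e :: ·)

-- the eviction loop: rotate set-bit entries (clearing them) to the back, replace the
-- first clear-bit entry; fuel = len(queue) + 1 always suffices
def scEvict (page : Int) : Nat → List (Int × Int) → List (Int × Int)
  | 0, q => q
  | fuel + 1, q =>
    match q with
    | [] => []
    | (x, b) :: rest =>
      if b = 0 then rest ++ [(page, 1)]
      else scEvict page fuel (rest ++ [(x, 0)])

def scStepB (frames : Int) (st : List (Int × Int) × Int) (page : Int) :
    List (Int × Int) × Int :=
  let (q, f) := st
  match scMark page q with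
  | some q' => (q', f)
  | none =>
    if (q.length : Int) < frames then (q ++ [(page, 1)], f + 1)
    else (scEvict page (q.length + 1) q, f + 1)

def second_chance_alt (pages : List Int) (frames : Int) : Int :=
  (pages.foldl (scStepB frames) ([], 0)).2

-- ===== PRECONDITION & SPEC =====
-- A raises IndexError (ref_bit[0] on empty memory) whenever frames ≤ 0 and pages ≠ []
def Pre_second_chance (pages : List Int) (frames : Int) : Prop := pages = [] ∨ 1 ≤ frames
instance (pages : List Int) (frames : Int) : Decidable (Pre_second_chance pages frames) := by
  unfold Pre_second_chance; infer_instance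
def pvWitness_second_chance : List Int × Int := ([1, 2, 3, 1, 4, 2], 3)

def Spec_second_chance (pages : List Int) (frames : Int) (out : Int) : Prop := out = second_chance_alt pages frames
instance (pages : List Int) (frames : Int) (out : Int) : Decidable (Spec_second_chance pages frames out) := by unfold Spec_second_chance; infer_instance

-- ===== CLAIM (what is proved, stated in full; the proofs are below) =====
def Claim_equal_second_chance : Prop := ∀ (pages : List Int) (frames : Int), Dom_second_chance pages frames → Pre_second_chance pages frames → Spec_second_chance pages frames (second_chance pages frames)

-- ===== LEMMAS AND PROOFS =====

-- rotation of a list: front-to-back queue order seen from clock position p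
def scRot (z : List (Int × Int)) (p : Nat) : List (Int × Int) := z.drop p ++ z.take p

-- the simulation invariant tying A's state (m, r, p) to B's queue q, n = frames.toNat
def scInv (n : Nat) (m r : List Int) (p : Nat) (q : List (Int × Int)) : Prop :=
  m.length = r.length ∧ m.length ≤ n ∧ m.Nodup ∧
  (p = 0 ∨ m.length = n) ∧ p < n ∧ q = scRot (m.zip r) p

lemma scRot_perm (z : List (Int × Int)) (p : Nat) : (scRot z p).Perm z := by
  simpa [scRot] using (List.perm_append_comm.trans (by rw [List.take_append_drop]))

lemma zip_set_both (m r : List Int) (p : Nat) (a b : Int)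
    (h : m.length = r.length) :
    (m.set p a).zip (r.set p b) = (m.zip r).set p (a, b) := by
  induction m generalizing r p with
  | nil => simp
  | cons x m ih =>
    cases r with
    | nil => simp at h
    | cons y r =>
      cases p with
      | zero => simp
      | succ p => simpa using ih r p (by simpa using h)

lemma zip_set_snd (m r : List Int) (p : Nat) (b : Int)
    (h : m.length = r.length) (hp : p < m.length) :
    m.zip (r.set p b) = (m.zip r).set p (m[p]'hp, b) := by
  conv_lhs => rw [← List.set_getElem_self hp]
  rw [zip_set_both _ _ _ _ _ h]

-- decomposing the rotation at the clock position
lemma scRot_cons (z : List (Int × Int)) (p : Nat) (hp : p < z.length) :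
    scRot z p = z[p]'hp :: (z.drop (p+1) ++ z.take p) := by
  rw [scRot, List.drop_eq_getElem_cons hp]; rfl

-- one clock step: replacing the candidate and advancing = popping the front, pushing the back
lemma scRot_step (z : List (Int × Int)) (v : Int × Int) (p : Nat) (hp : p < z.length) :
    scRot (z.set p v) ((p+1) % z.length) = z.drop (p+1) ++ z.take p ++ [v] := by
  have hl : (z.take p).length = p := List.length_take_of_le hp.le
  rcases Nat.lt_or_ge (p+1) z.length with h | h
  · rw [Nat.mod_eq_of_lt h, List.set_eq_take_cons_drop v hp, scRot]
    have hsplit : z.take p ++ v :: z.drop (p+1) = (z.take p ++ [v]) ++ z.drop (p+1) := by simp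
    have hlv : (z.take p ++ [v]).length = p + 1 := by simp [hl]
    have h1 : (z.take p ++ v :: z.drop (p+1)).drop (p+1) = z.drop (p+1) := by
      rw [hsplit, ← hlv, List.drop_left]
    have h2 : (z.take p ++ v :: z.drop (p+1)).take (p+1) = z.take p ++ [v] := by
      rw [hsplit, ← hlv, List.take_left]
    rw [h1, h2]; simp
  · have hpe : p + 1 = z.length := by omega
    have h0 : (p+1) % z.length = 0 := by rw [hpe]; simp
    rw [h0, List.set_eq_take_cons_drop v hp, scRot]
    have hd : z.drop (p+1) = [] := List.drop_eq_nil_of_le (le_of_eq hpe.symm)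
    simp [hd]

-- the hit update as a map (the matching page is unique in the queue)
def scHitF (page : Int) (e : Int × Int) : Int × Int := if e.1 = page then (e.1, 1) else e

lemma scMark_none_iff (page : Int) (q : List (Int × Int)) :
    scMark page q = none ↔ ∀ e ∈ q, e.1 ≠ page := by
  induction q with
  | nil => simp [scMark]
  | cons e rest ih =>
    by_cases h : e.1 = page
    · simp [scMark, h]
    · simp [scMark, h, ih]

lemma scHitF_map_id (page : Int) (q : List (Int × Int)) (h : ∀ e ∈ q, e.1 ≠ page) :
    q.map (scHitF page) = q := by
  induction q with
  | nil => rfl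
  | cons e rest ih =>
    have he : e.1 ≠ page := h e (by simp)
    simp [scHitF, he, ih (fun x hx => h x (by simp [hx]))]

lemma scMark_eq_map (page : Int) (q : List (Int × Int))
    (hmem : page ∈ q.map Prod.fst) (hnd : (q.map Prod.fst).Nodup) :
    scMark page q = some (q.map (scHitF page)) := by
  induction q with
  | nil => simp at hmem
  | cons e rest ih =>
    by_cases h : e.1 = page
    · have hnp : page ∉ rest.map Prod.fst := by
        simp only [List.map_cons, List.nodup_cons] at hnd
        rw [← h]; exact hnd.1
      have : rest.map (scHitF page) = rest := by
        apply scHitF_map_id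
        intro x hx hxp
        exact hnp (by rw [← hxp]; exact List.mem_map_of_mem hx)
      simp [scMark, h, scHitF, this]
    · have hmem' : page ∈ rest.map Prod.fst := by
        simp only [List.map_cons, List.mem_cons] at hmem
        tauto
      have hnd' : (rest.map Prod.fst).Nodup := by
        simp only [List.map_cons, List.nodup_cons] at hnd
        exact hnd.2
      simp [scMark, h, ih hmem' hnd', scHitF]

lemma zip_map_scHitF (page : Int) (m r : List Int) (i : Nat)
    (h : m.length = r.length) (hnd : m.Nodup)
    (hidx : PySem.List.index? m page = some i) :
    m.zip (r.set i 1) = (m.zip r).map (scHitF page) := by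
  induction m generalizing r i with
  | nil => simp [PySem.List.index?_eq_idxOf?] at hidx
  | cons x m ih =>
    cases r with
    | nil => simp at h
    | cons y r =>
      by_cases hx : x = page
      · subst hx
        rw [PySem.List.index?_cons_self x m] at hidx
        obtain rfl : (0 : Nat) = i := by simpa using hidx
        have hnp : x ∉ m := (List.nodup_cons.mp hnd).1
        have : (m.zip r).map (scHitF x) = m.zip r := by
          apply scHitF_map_id
          intro e he hep
          exact hnp (by rw [← hep]; exact (List.of_mem_zip he).1)
        simp [scHitF, this]
      · rw [PySem.List.index?_cons_of_ne m hx] at hidx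
        obtain ⟨i', hi', rfl⟩ : ∃ i', PySem.List.index? m page = some i' ∧ i = i' + 1 := by
          cases hI : PySem.List.index? m page with
          | none => rw [hI] at hidx; simp at hidx
          | some j => rw [hI] at hidx; exact ⟨j, rfl, by simpa using hidx.symm⟩
        simp only [List.set, List.zip_cons_cons, List.map_cons]
        rw [ih r i' (by simpa using h) (List.nodup_cons.mp hnd).2 hi']
        simp [scHitF, hx]

lemma scRot_map (g : Int × Int → Int × Int) (z : List (Int × Int)) (p : Nat) :
    scRot (z.map g) p = (scRot z p).map g := by
  simp [scRot, List.map_append, List.map_drop, List.map_take]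

-- the clock sweep of A and the pop/push eviction loop of B walk the same cyclic order
lemma sweep_evict (page : Int) (frames : Int) (n : Nat) (hn : frames.toNat = n) (hn0 : 0 < n) :
    ∀ (fuel : Nat) (m r : List Int) (p : Nat), m.length = r.length → m.length = n → p < n →
    scEvict page fuel (scRot (m.zip r) p) =
      scRot (((scSweep page frames fuel m r p).1).zip ((scSweep page frames fuel m r p).2.1))
            ((scSweep page frames fuel m r p).2.2)
    ∧ (scSweep page frames fuel m r p).1.length = n
    ∧ (scSweep page frames fuel m r p).2.1.length = n
    ∧ (scSweep page frames fuel m r p).2.2 < n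
    ∧ (page ∉ m → m.Nodup → (scSweep page frames fuel m r p).1.Nodup) := by
  intro fuel
  induction fuel with
  | zero =>
    intro m r p hlen hm hp
    refine ⟨rfl, ?_, ?_, ?_, fun _ h => h⟩ <;> simp [scSweep] <;> omega
  | succ fuel ih =>
    intro m r p hlen hm hp
    have hzlen : (m.zip r).length = n := by rw [List.length_zip]; omega
    have hpz : p < (m.zip r).length := by omega
    have hpm : p < m.length := by omega
    have hpr : p < r.length := by omega
    have hget : (m.zip r)[p]'hpz = (m[p]'hpm, r[p]'hpr) := List.getElem_zip
    have hrot := scRot_cons (m.zip r) p hpz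
    have hgd : r.getD p 1 = r[p]'hpr := List.getD_eq_getElem r 1 hpr
    by_cases hb : r[p]'hpr = 0
    · -- candidate bit clear: evict here
      have hA : scSweep page frames (fuel+1) m r p =
          (m.set p page, r.set p 1, (p + 1) % frames.toNat) := by
        simp only [scSweep]
        rw [hgd]
        simp [hb]
      have hB : scEvict page (fuel+1) (scRot (m.zip r) p) =
          ((m.zip r).drop (p+1) ++ (m.zip r).take p) ++ [(page, 1)] := by
        rw [hrot, hget]; simp [scEvict, hb]
      rw [hA, hB]
      dsimp only
      refine ⟨?_, by simp only [List.length_set]; omega, by simp only [List.length_set]; omega, by rw [hn]; exact Nat.mod_lt _ hn0, ?_⟩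
      · rw [zip_set_both _ _ _ _ _ hlen, hn, ← hzlen, scRot_step _ _ _ hpz]
      · intro hnp hnd
        exact List.Nodup.set hnd hnp
    · -- candidate bit set: clear it and advance
      have hA : scSweep page frames (fuel+1) m r p =
          scSweep page frames fuel m (r.set p 0) ((p + 1) % frames.toNat) := by
        simp only [scSweep]
        rw [hgd]
        simp [hb]
      have hB : scEvict page (fuel+1) (scRot (m.zip r) p) =
          scEvict page fuel (((m.zip r).drop (p+1) ++ (m.zip r).take p) ++ [(m[p]'hpm, 0)]) := by
        rw [hrot, hget]; simp [scEvict, hb]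
      have hq : ((m.zip r).drop (p+1) ++ (m.zip r).take p) ++ [(m[p]'hpm, 0)] =
          scRot (m.zip (r.set p 0)) ((p + 1) % frames.toNat) := by
        rw [zip_set_snd _ _ _ _ hlen hpm, hn, ← hzlen, scRot_step _ _ _ hpz]
      rw [hA, hB, hq]
      have hmod : (p + 1) % frames.toNat < n := by rw [hn]; exact Nat.mod_lt _ hn0
      exact ih m (r.set p 0) ((p + 1) % frames.toNat) (by simp [hlen]) hm hmod

-- one trace step preserves the simulation and the fault counters
lemma step_sim (frames : Int) (hfr : 1 ≤ frames) (m r : List Int) (p : Nat) (f : Int)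
    (q : List (Int × Int)) (page : Int) (hinv : scInv frames.toNat m r p q) :
    scInv frames.toNat (scStepA frames (m, r, p, f) page).1 (scStepA frames (m, r, p, f) page).2.1
      (scStepA frames (m, r, p, f) page).2.2.1 (scStepB frames (q, f) page).1
    ∧ (scStepB frames (q, f) page).2 = (scStepA frames (m, r, p, f) page).2.2.2 := by
  obtain ⟨hlen, hle, hnd, hp0, hpn, hq⟩ := hinv
  have hperm : q.Perm (m.zip r) := hq ▸ scRot_perm (m.zip r) p
  have hfst : (m.zip r).map Prod.fst = m := List.map_fst_zip (by omega)
  have hqfst : (q.map Prod.fst).Perm m := hfst ▸ hperm.map Prod.fst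
  by_cases hmem : page ∈ m
  · -- HIT
    obtain ⟨i, hi⟩ : ∃ i, PySem.List.index? m page = some i :=
      Option.isSome_iff_exists.mp ((PySem.List.index?_isSome_iff m page).mpr hmem)
    have hmark : scMark page q = some (q.map (scHitF page)) :=
      scMark_eq_map page q (hqfst.mem_iff.mpr hmem) (hqfst.nodup_iff.mpr hnd)
    have hA : scStepA frames (m, r, p, f) page = (m, r.set i 1, p, f) := by
      have hi' := hi
      rw [PySem.List.index?_eq_idxOf?] at hi'
      simp [scStepA, hmem, hi']
    have hB : scStepB frames (q, f) page = (q.map (scHitF page), f) := by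
      simp [scStepB, hmark]
    rw [hA, hB]
    dsimp only
    refine ⟨⟨by simp [hlen], hle, hnd, hp0, hpn, ?_⟩, rfl⟩
    rw [hq, ← scRot_map, ← zip_map_scHitF page m r i hlen hnd hi]
  · -- MISS
    have hmark : scMark page q = none := by
      rw [scMark_none_iff]
      intro e he hep
      apply hmem
      have hm1 : e.1 ∈ q.map Prod.fst := List.mem_map_of_mem he
      rw [hep] at hm1
      exact hqfst.mem_iff.mp hm1
    have hqlen : q.length = m.length := by
      rw [hperm.length_eq, List.length_zip]; omega
    by_cases hlt : (m.length : Int) < frames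
    · -- room left: append
      obtain rfl : p = 0 := by
        rcases hp0 with h | h
        · exact h
        · exfalso; omega
      have hA : scStepA frames (m, r, 0, f) page = (m ++ [page], r ++ [1], 0, f + 1) := by
        simp [scStepA, hmem, hlt]
      have hB : scStepB frames (q, f) page = (q ++ [(page, 1)], f + 1) := by
        simp [scStepB, hmark, hqlen, hlt]
      rw [hA, hB]
      dsimp only
      refine ⟨⟨by simp [hlen], by simp only [List.length_append, List.length_cons, List.length_nil]; omega, ?_, Or.inl rfl, hpn, ?_⟩, rfl⟩
      · rw [List.nodup_append]
        refine ⟨hnd, List.nodup_singleton page, ?_⟩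
        intro a ha b hb
        rw [List.mem_singleton] at hb
        subst hb
        exact fun h => hmem (h ▸ ha)
      · rw [hq, List.zip_append hlen]
        simp [scRot]
    · -- full: run the clock
      have hfull : m.length = frames.toNat := by omega
      have hes := sweep_evict page frames frames.toNat rfl (by omega)
        (r.length + 1) m r p hlen hfull hpn
      have hA : scStepA frames (m, r, p, f) page =
          ((scSweep page frames (r.length + 1) m r p).1,
           (scSweep page frames (r.length + 1) m r p).2.1,
           (scSweep page frames (r.length + 1) m r p).2.2, f + 1) := by
        simp [scStepA, hmem, hlt]
      have hB : scStepB frames (q, f) page =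
          (scEvict page (q.length + 1) q, f + 1) := by
        simp [scStepB, hmark, hqlen, hlt]
      rw [hA, hB]
      dsimp only
      have hfuel : q.length + 1 = r.length + 1 := by omega
      refine ⟨⟨by rw [hes.2.1, hes.2.2.1], by rw [hes.2.1], ?_, Or.inr hes.2.1, hes.2.2.2.1, ?_⟩, rfl⟩
      · exact hes.2.2.2.2 hmem hnd
      · rw [hfuel, hq]
        exact hes.1

-- the whole trace: fold the step simulation over the page list
lemma fold_sim (frames : Int) (hfr : 1 ≤ frames) :
    ∀ (pages : List Int) (m r : List Int) (p : Nat) (f : Int) (q : List (Int × Int)),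
    scInv frames.toNat m r p q →
    (pages.foldl (scStepA frames) (m, r, p, f)).2.2.2 = (pages.foldl (scStepB frames) (q, f)).2 := by
  intro pages
  induction pages with
  | nil => intro m r p f q _; rfl
  | cons page rest ih =>
    intro m r p f q hinv
    have h := step_sim frames hfr m r p f q page hinv
    simp only [List.foldl_cons]
    rcases hA : scStepA frames (m, r, p, f) page with ⟨m', r', p', f'⟩
    rcases hB : scStepB frames (q, f) page with ⟨q', f2⟩
    rw [hA, hB] at h
    obtain ⟨hinv', hf⟩ := h
    simp only at hinv' hf
    rw [hf]
    exact ih m' r' p' f' q' hinv'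

theorem second_chance_spec : Claim_equal_second_chance := by
  intro pages frames _ hpre
  unfold Spec_second_chance
  rcases hpre with rfl | hfr
  · rfl
  · unfold second_chance second_chance_alt
    apply fold_sim frames hfr
    exact ⟨rfl, by simp, List.nodup_nil, Or.inl rfl, by omega, by simp [scRot]⟩
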